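-- pv_equiv track=rewrite | github.com/DeronJMartin/featureSelection | search.py | create_data_subset_fw
-- ===== SOURCE A (Python) =====
-- def create_data_subset_fw(x, current_features, j):
--     x_sub = []
--     c_f = current_features.copy()
--     c_f.append(j)
--     for i in range(len(x)):
--         row = []
--         for j in range(len(x[i])):
--             if j in c_f:
--                 row.append(x[i][j])
--         x_sub.append(row)
--     return x_sub
-- ===== SOURCE B (Python) =====
-- def create_data_subset_fw(x, current_features, j):
--     sel = sorted(set(current_features) | {j})
--     return [[row[k] for k in sel if 0 <= k < len(row)] for row in x]
-- ===== Notes on version B (the rewrite author's own statement) =====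
-- stated objective: faster
-- what changed: B precomputes the sorted, deduplicated set of selected indices once and iterates each row over that index list, instead of scanning every column of every row with a linear membership test against the feature list.
import Mathlib
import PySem

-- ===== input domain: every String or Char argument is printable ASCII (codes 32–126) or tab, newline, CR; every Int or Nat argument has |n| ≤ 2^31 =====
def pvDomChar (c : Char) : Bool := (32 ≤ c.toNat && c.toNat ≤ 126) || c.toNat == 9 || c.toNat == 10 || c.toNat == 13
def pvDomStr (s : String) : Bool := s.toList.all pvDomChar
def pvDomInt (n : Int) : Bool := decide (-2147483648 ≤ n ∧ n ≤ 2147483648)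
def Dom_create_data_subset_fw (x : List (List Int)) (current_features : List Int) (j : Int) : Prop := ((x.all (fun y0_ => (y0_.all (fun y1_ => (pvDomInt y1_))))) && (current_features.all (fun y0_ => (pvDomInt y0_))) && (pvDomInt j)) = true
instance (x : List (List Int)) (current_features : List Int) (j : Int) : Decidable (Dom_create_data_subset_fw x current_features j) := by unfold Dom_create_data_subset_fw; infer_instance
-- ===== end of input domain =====

-- B precomputes the sorted deduplicated selected-index list once and iterates each row
-- over it, instead of A's scan of every column with a membership test (objective: faster).

-- ===== PORT A =====
def create_data_subset_fw (x : List (List Int)) (current_features : List Int) (j : Int) : List (List Int) :=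
  -- c_f = current_features.copy(); c_f.append(j)
  let c_f : List Int := current_features ++ [j]
  -- for i in range(len(x)): for j in range(len(x[i])): if j in c_f: row.append(x[i][j])
  x.foldl (fun x_sub row =>
    x_sub ++ [(List.range row.length).foldl
      (fun r (k : Nat) => if (k : Int) ∈ c_f then r ++ [row.getD k 0] else r) []]) []

-- ===== PORT B =====
def create_data_subset_fw_alt (x : List (List Int)) (current_features : List Int) (j : Int) : List (List Int) :=
  -- sel = sorted(set(current_features) | {j})
  let sel : List Int := PySem.List.sorted (PySem.Set.add (PySem.Set.ofList current_features) j) (fun k => k) false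
  -- [[row[k] for k in sel if 0 <= k < len(row)] for row in x]
  x.map (fun row =>
    (sel.filter (fun k => 0 ≤ k ∧ k < (row.length : Int))).map (fun k => row.getD k.toNat 0))

-- ===== PRECONDITION & SPEC =====
def Spec_create_data_subset_fw (x : List (List Int)) (current_features : List Int) (j : Int) (out : List (List Int)) : Prop := out = create_data_subset_fw_alt x current_features j
instance (x : List (List Int)) (current_features : List Int) (j : Int) (out : List (List Int)) : Decidable (Spec_create_data_subset_fw x current_features j out) := by unfold Spec_create_data_subset_fw; infer_instance

-- ===== CLAIM (what is proved, stated in full; the proofs are below) =====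
def Claim_equal_create_data_subset_fw : Prop := ∀ (x : List (List Int)) (current_features : List Int) (j : Int), Dom_create_data_subset_fw x current_features j → Spec_create_data_subset_fw x current_features j (create_data_subset_fw x current_features j)

-- ===== LEMMAS AND PROOFS =====

-- B's set(current_features) | {j} is the set of current_features ++ [j].
theorem pv_set_add_eq (cf : List Int) (j : Int) :
    PySem.Set.add (PySem.Set.ofList cf) j = PySem.Set.ofList (cf ++ [j]) := by
  simp [PySem.Set.ofList_eq_foldl, List.foldl_append]

-- The ascending in-range indices A keeps for a row of length n equal B's filtered sel list.
theorem pv_index_lists_eq (cf : List Int) (j : Int) (n : Nat) :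
    ((List.range n).filter (fun (k : Nat) => decide ((k : Int) ∈ cf ++ [j]))).map (fun (k : Nat) => (k : Int)) =
      (PySem.List.sorted (PySem.Set.add (PySem.Set.ofList cf) j) (fun k => k) false).filter
        (fun k => decide (0 ≤ k ∧ k < (n : Int))) := by
  rw [pv_set_add_eq]
  have hs := PySem.List.sorted_ofList_pairwise_lt (cf ++ [j])
  apply List.Perm.eq_of_pairwise (le := (· < ·))
  · intro a b _ _ h1 h2; omega
  · exact ((List.pairwise_lt_range.filter _).map _ (by intro a b h; exact_mod_cast h))
  · exact hs.filter _
  · apply (List.perm_ext_iff_of_nodup ?_ ?_).mpr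
    · intro a
      simp only [List.mem_map, List.mem_filter, List.mem_range, PySem.List.mem_sorted,
        decide_eq_true_eq, PySem.Set.mem_ofList]
      constructor
      · rintro ⟨k, ⟨hk, hmem⟩, rfl⟩
        exact ⟨hmem, by omega, by exact_mod_cast hk⟩
      · rintro ⟨hmem, h0, hn⟩
        refine ⟨a.toNat, ⟨by omega, ?_⟩, Int.toNat_of_nonneg h0⟩
        rwa [Int.toNat_of_nonneg h0]
    · exact ((List.nodup_range).filter _).map Nat.cast_injective
    · exact (hs.nodup).filter _

-- A's inner per-row loop equals B's per-row comprehension.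
theorem pv_row_eq (cf : List Int) (j : Int) (row : List Int) :
    (List.range row.length).foldl
      (fun r (k : Nat) => if (k : Int) ∈ cf ++ [j] then r ++ [row.getD k 0] else r) [] =
      ((PySem.List.sorted (PySem.Set.add (PySem.Set.ofList cf) j) (fun k => k) false).filter
        (fun k => decide (0 ≤ k ∧ k < (row.length : Int)))).map (fun k => row.getD k.toNat 0) := by
  have h := PySem.List.foldl_append_if (fun k : Nat => decide ((k : Int) ∈ cf ++ [j]))
    (fun k : Nat => row.getD k 0) (List.range row.length) []
  simp only [decide_eq_true_eq, List.nil_append] at h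
  rw [h, ← pv_index_lists_eq cf j row.length, List.map_map]
  simp

-- ===== VERDICT (by name: the statement is the Claim_ definition above) =====
theorem create_data_subset_fw_spec : Claim_equal_create_data_subset_fw := by
  intro x cf j _
  unfold Spec_create_data_subset_fw create_data_subset_fw create_data_subset_fw_alt
  rw [PySem.List.foldl_append_singleton_eq_map, List.nil_append]
  exact List.map_congr_left (fun row _ => pv_row_eq cf j row)
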